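-- pv_equiv track=rewrite | github.com/SAMIHSaad/VMAUTO | audit_and_fix_vms.py | detach_iso_devices
-- ===== SOURCE A (Python) =====
-- from typing import Tuple
--
-- CDROM_ADDRS = ["ide1:0", "sata0:1", "ide0:1"]
--
-- def set_or_add_vmx(lines: list[str], key: str, value: str) -> Tuple[list[str], bool]:
--     """Set key="value" in VMX lines; add if missing. Returns (lines, changed)."""
--     target = f'{key} = "{value}"'
--     lowered = key.lower()
--     changed = False
--     for i, l in enumerate(lines):
--         s = l.strip()
--         if s.lower().startswith(lowered + " ") and "=" in s:
--             if l != target: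
--                 lines[i] = target
--                 changed = True
--             return lines, changed
--     # not found -> append
--     lines.append(target)
--     return lines, True
--
-- def detach_iso_devices(lines: list[str]) -> Tuple[list[str], bool]:
--     changed_any = False
--     for addr in CDROM_ADDRS:
--         for k, v in [
--             (f"{addr}.present", "FALSE"),
--             (f"{addr}.startConnected", "FALSE"),
--             (f"{addr}.deviceType", "cdrom-raw"),
--             (f"{addr}.fileName", ""),
--         ]:
--             lines, ch = set_or_add_vmx(lines, k, v)
--             changed_any = changed_any or ch
--     return lines, changed_any
-- ===== SOURCE B (Python) =====
-- from typing import Tuple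
--
-- CDROM_ADDRS = ["ide1:0", "sata0:1", "ide0:1"]
--
-- def detach_iso_devices(lines: list[str]) -> Tuple[list[str], bool]:
--     # One pass over lines: map each candidate line's lowercased first
--     # space-delimited token to its first index, then handle the 12 keys by
--     # dict lookup instead of rescanning lines for every key.
--     idx = {}
--     for i, l in enumerate(lines):
--         s = l.strip()
--         if "=" in s:
--             sl = s.lower()
--             if " " in sl:
--                 tok = sl[:sl.find(" ")]
--                 if tok not in idx:
--                     idx[tok] = i
--     changed_any = False
--     for addr in CDROM_ADDRS:
--         for k, v in [
--             (f"{addr}.present", "FALSE"),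
--             (f"{addr}.startConnected", "FALSE"),
--             (f"{addr}.deviceType", "cdrom-raw"),
--             (f"{addr}.fileName", ""),
--         ]:
--             target = f'{k} = "{v}"'
--             i = idx.get(k.lower())
--             if i is None:
--                 lines.append(target)
--                 changed_any = True
--             elif lines[i] != target:
--                 lines[i] = target
--                 changed_any = True
--     return lines, changed_any
-- ===== Notes on version B (the rewrite author's own statement) =====
-- stated objective: faster
-- what changed: A rescans the whole (growing) lines list once per key (12 scans via set_or_add_vmx); B makes a single pass building a dict from each candidate line's lowercased first space-delimited token to its first index, then serves all 12 keys by O(1) dict lookups.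
import Mathlib
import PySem

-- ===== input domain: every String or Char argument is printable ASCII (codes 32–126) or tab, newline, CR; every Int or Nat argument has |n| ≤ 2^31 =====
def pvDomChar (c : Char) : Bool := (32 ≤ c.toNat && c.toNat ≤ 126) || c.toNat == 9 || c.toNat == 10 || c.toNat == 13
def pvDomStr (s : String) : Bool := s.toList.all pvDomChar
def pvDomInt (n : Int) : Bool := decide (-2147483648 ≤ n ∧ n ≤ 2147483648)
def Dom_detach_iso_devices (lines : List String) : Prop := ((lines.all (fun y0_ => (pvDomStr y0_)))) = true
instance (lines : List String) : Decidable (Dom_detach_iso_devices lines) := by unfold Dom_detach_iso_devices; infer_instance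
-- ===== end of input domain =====

-- B replaces A's 12 repeated scans of `lines` with one pass building a first-token → first-index
-- dict, then 12 lookups. Both Pythons mutate `lines` in place (set/append); the equivalence
-- proved here is about the returned (lines, changed) value.

-- ===== PORT A =====
def pvCdromAddrs : List String := ["ide1:0", "sata0:1", "ide0:1"]

-- loop-body test of set_or_add_vmx: s = l.strip(); s.lower().startswith(lowered + " ") and "=" in s
def pvMatchA (lowered l : String) : Bool :=
  let s := PySem.Str.strip l
  PySem.Str.startswith (PySem.Str.lower s) (lowered ++ " ") && PySem.Str.isIn "=" s

-- 'for i, l in enumerate(lines): …' of set_or_add_vmx, scanning the suffix `rest` (indices from i)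
def pvSetOrAddGo (lines : List String) (target lowered : String) : List String → Nat → List String × Bool
  | [], _ => (lines ++ [target], true)                     -- not found -> append
  | l :: rest, i =>
      if pvMatchA lowered l then
        if l ≠ target then (lines.set i target, true) else (lines, false)
      else pvSetOrAddGo lines target lowered rest (i + 1)

def pvSetOrAddVmx (lines : List String) (key value : String) : List String × Bool :=
  pvSetOrAddGo lines (key ++ " = \"" ++ value ++ "\"") (PySem.Str.lower key) lines 0

def pvPairsA (addr : String) : List (String × String) :=
  [(addr ++ ".present", "FALSE"), (addr ++ ".startConnected", "FALSE"),
   (addr ++ ".deviceType", "cdrom-raw"), (addr ++ ".fileName", "")]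

def detach_iso_devices (lines : List String) : List String × Bool :=
  pvCdromAddrs.foldl (fun st addr =>
    (pvPairsA addr).foldl (fun st kv =>
      let r := pvSetOrAddVmx st.1 kv.1 kv.2
      (r.1, st.2 || r.2)) st) (lines, false)

-- ===== PORT B =====
-- one enumerate step of Source B's index-building pass:
--   s = l.strip(); if "=" in s: sl = s.lower(); if " " in sl: tok = sl[:sl.find(" ")]; first wins
-- (sl.find(" ") ≥ 0 under the guard " " in sl, so the slice is the first space-delimited token)
def pvIdxStep (d : PySem.Dict String Int) (p : Int × String) : PySem.Dict String Int :=
  let s := PySem.Str.strip p.2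
  if PySem.Str.isIn "=" s then
    let sl := PySem.Str.lower s
    if PySem.Str.isIn " " sl then
      let tok := PySem.Str.slice sl none (some (PySem.Str.find sl " "))
      if d.contains tok then d else d.insert tok p.1
    else d
  else d

def pvBuildIdx (lines : List String) : PySem.Dict String Int :=
  (PySem.List.enumerate lines).foldl pvIdxStep PySem.Dict.empty

-- one (k, v) iteration of Source B's key loop; indices in the dict come from enumerate, so they are
-- in range of the original lines and hence of the current st.1 (pyGetD/pySetD are exact there)
def pvStepB (d : PySem.Dict String Int) (st : List String × Bool) (kv : String × String) : List String × Bool :=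
  let target := kv.1 ++ " = \"" ++ kv.2 ++ "\""
  match d.get? (PySem.Str.lower kv.1) with
  | none => (st.1 ++ [target], true)
  | some i =>
      if PySem.List.pyGetD st.1 i "" ≠ target then (PySem.List.pySetD st.1 i target, true)
      else st

def detach_iso_devices_alt (lines : List String) : List String × Bool :=
  let d := pvBuildIdx lines
  pvCdromAddrs.foldl (fun st addr => (pvPairsA addr).foldl (pvStepB d) st) (lines, false)

-- ===== PRECONDITION & SPEC =====
def Spec_detach_iso_devices (lines : List String) (out : List String × Bool) : Prop := out = detach_iso_devices_alt lines
instance (lines : List String) (out : List String × Bool) : Decidable (Spec_detach_iso_devices lines out) := by unfold Spec_detach_iso_devices; infer_instance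

-- ===== CLAIM (what is proved, stated in full; the proofs are below) =====
def Claim_equal_detach_iso_devices : Prop := ∀ (lines : List String), Dom_detach_iso_devices lines → Spec_detach_iso_devices lines (detach_iso_devices lines)

-- ===== LEMMAS AND PROOFS =====

-- the candidate token of a line, exactly as B computes it (none = not a candidate line)
def pvTok? (l : String) : Option String :=
  let s := PySem.Str.strip l
  if PySem.Str.isIn "=" s then
    let sl := PySem.Str.lower s
    if PySem.Str.isIn " " sl then
      some (PySem.Str.slice sl none (some (PySem.Str.find sl " ")))
    else none
  else none

def pvTgt (kv : String × String) : String := kv.1 ++ " = \"" ++ kv.2 ++ "\""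

def pvStepA (st : List String × Bool) (kv : String × String) : List String × Bool :=
  let r := pvSetOrAddVmx st.1 kv.1 kv.2
  (r.1, st.2 || r.2)

def pvPairs12 : List (String × String) :=
  pvPairsA "ide1:0" ++ pvPairsA "sata0:1" ++ pvPairsA "ide0:1"

lemma pvIsIn_singleton (c : Char) (l : List Char) : PySem.Chars.isIn [c] l = true ↔ c ∈ l := by
  unfold PySem.Chars.isIn
  rw [bne_iff_ne, ne_eq, ← ne_eq, PySem.Chars.find_ne_neg_one_iff]
  exact List.singleton_infix_iff c l

-- first-token decomposition: a line starts with κ followed by a space iff it contains a space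
-- and the prefix before the first space is exactly κ  (κ itself space-free)
lemma pvTok_core (κ sl : List Char) (hκ : ' ' ∉ κ) :
    PySem.Chars.startswith sl (κ ++ [' ']) = true ↔
      (' ' ∈ sl ∧ List.take (PySem.Chars.find sl [' ']).toNat sl = κ) := by
  rw [PySem.Chars.startswith_iff]
  constructor
  · rintro ⟨t, ht⟩
    have hsl : sl = κ ++ ' ' :: t := by rw [← ht]; simp
    subst hsl
    refine ⟨by simp, ?_⟩
    have hnn : 0 ≤ PySem.Chars.find (κ ++ ' ' :: t) [' '] :=
      (PySem.Chars.find_nonneg_iff _ _).mpr (List.singleton_infix_iff ' ' _ |>.mpr (by simp))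
    obtain ⟨hpre, hmin⟩ := PySem.Chars.find_spec hnn
    set j := (PySem.Chars.find (κ ++ ' ' :: t) [' ']).toNat with hj
    have hle : j ≤ κ.length := by
      rcases Nat.lt_or_ge κ.length j with h | h
      · exact absurd ⟨t, by rw [List.drop_left]; rfl⟩ (hmin κ.length h)
      · exact h
    have heq : j = κ.length := by
      rcases Nat.lt_or_ge j κ.length with hlt | hge
      · exfalso
        obtain ⟨u, hu⟩ := hpre
        have h1 : (κ ++ ' ' :: t)[j]? = some ' ' := by
          have hd := List.getElem?_drop (xs := κ ++ ' ' :: t) (i := j) (j := 0)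
          rw [← hu] at hd
          simpa using hd.symm
        rw [List.getElem?_append_left hlt] at h1
        exact absurd (List.mem_of_getElem? h1) hκ
      · omega
    rw [heq, List.take_left]
  · rintro ⟨hmem, htake⟩
    have hnn : 0 ≤ PySem.Chars.find sl [' '] :=
      (PySem.Chars.find_nonneg_iff _ _).mpr ((List.singleton_infix_iff ' ' sl).mpr hmem)
    obtain ⟨hpre, _⟩ := PySem.Chars.find_spec hnn
    obtain ⟨u, hu⟩ := hpre
    refine ⟨u, ?_⟩
    have hdrop : List.drop (PySem.Chars.find sl [' ']).toNat sl = ' ' :: u := by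
      rw [← hu]; rfl
    calc (κ ++ [' ']) ++ u = κ ++ (' ' :: u) := by simp
      _ = List.take (PySem.Chars.find sl [' ']).toNat sl
            ++ List.drop (PySem.Chars.find sl [' ']).toNat sl := by rw [htake, hdrop]
      _ = sl := List.take_append_drop _ _

-- line lemma: A's per-line test for lowered key κ is "B's token equals κ"
set_option maxHeartbeats 1000000 in
lemma pvMatch_eq_tok (κ l : String) (hκ : ' ' ∉ κ.toList) :
    pvMatchA κ l = (pvTok? l == some κ) := by
  apply Bool.coe_iff_coe.mp
  rw [beq_iff_eq]
  have hks : (κ ++ " ").toList = κ.toList ++ [' '] := by rw [String.toList_append]; rfl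
  have hSL : (PySem.Str.lower (PySem.Str.strip l)).toList
      = PySem.Chars.lower (PySem.Str.strip l).toList := PySem.Str.toList_lower _
  set S : List Char := (PySem.Str.strip l).toList with hSdef
  set SL : List Char := PySem.Chars.lower S with hSLdef
  constructor
  · intro hA
    simp only [pvMatchA, Bool.and_eq_true] at hA
    obtain ⟨h1, h2⟩ := hA
    rw [PySem.Str.startswith_eq, hSL, hks] at h1
    obtain ⟨hsp, htake⟩ := (pvTok_core κ.toList SL hκ).mp h1
    have hg1 : PySem.Str.isIn " " (PySem.Str.lower (PySem.Str.strip l)) = true := by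
      rw [PySem.Str.isIn_eq, hSL]
      exact (pvIsIn_singleton ' ' SL).mpr hsp
    simp only [pvTok?]
    rw [if_pos h2, if_pos hg1]
    refine congrArg some ?_
    apply String.toList_inj.mp
    have hj0 : 0 ≤ PySem.Str.find (PySem.Str.lower (PySem.Str.strip l)) " " := by
      rw [PySem.Str.find_eq, hSL]
      exact (PySem.Chars.find_nonneg_iff SL [' ']).mpr ((List.singleton_infix_iff ' ' SL).mpr hsp)
    rw [PySem.Str.toList_slice, PySem.Chars.slice_eq_listSlice, PySem.List.slice_to _ hj0, hSL,
      PySem.Str.find_eq, hSL]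
    exact htake
  · intro hB
    simp only [pvTok?] at hB
    by_cases h2 : PySem.Str.isIn "=" (PySem.Str.strip l) = true
    · rw [if_pos h2] at hB
      by_cases hg1 : PySem.Str.isIn " " (PySem.Str.lower (PySem.Str.strip l)) = true
      · rw [if_pos hg1] at hB
        have hsp : ' ' ∈ SL := by
          rw [PySem.Str.isIn_eq, hSL] at hg1
          exact (pvIsIn_singleton ' ' SL).mp hg1
        have hj0 : 0 ≤ PySem.Str.find (PySem.Str.lower (PySem.Str.strip l)) " " := by
          rw [PySem.Str.find_eq, hSL]
          exact (PySem.Chars.find_nonneg_iff SL [' ']).mpr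
            ((List.singleton_infix_iff ' ' SL).mpr hsp)
        have htake : List.take (PySem.Chars.find SL [' ']).toNat SL = κ.toList := by
          have hh := congrArg String.toList (Option.some.inj hB)
          rw [PySem.Str.toList_slice, PySem.Chars.slice_eq_listSlice, PySem.List.slice_to _ hj0,
            hSL, PySem.Str.find_eq, hSL] at hh
          exact hh
        simp only [pvMatchA, Bool.and_eq_true]
        refine ⟨?_, h2⟩
        rw [PySem.Str.startswith_eq, hSL, hks]
        exact (pvTok_core κ.toList SL hκ).mpr ⟨hsp, htake⟩
      · rw [if_neg hg1] at hB
        exact absurd hB (by simp)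
    · rw [if_neg h2] at hB
      exact absurd hB (by simp)

-- findIdx? is unchanged by setting a position that fails the predicate before and after
lemma pvFindIdx?_set {α : Type} (p : α → Bool) (l : List α) (i : Nat) (a : α)
    (h1 : p a = false) (h2 : ∀ x, l[i]? = some x → p x = false) :
    List.findIdx? p (l.set i a) = List.findIdx? p l := by
  induction l generalizing i with
  | nil => simp
  | cons b t ih =>
    cases i with
    | zero =>
      have hb : p b = false := h2 b rfl
      simp [List.findIdx?_cons, h1, hb]
    | succ n =>
      have ht : ∀ x, t[n]? = some x → p x = false := fun x hx => h2 x (by simpa using hx)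
      rw [List.set_cons_succ, List.findIdx?_cons, List.findIdx?_cons, ih n ht]

lemma pvFindIdx?_append_singleton {α : Type} (p : α → Bool) (l : List α) (a : α)
    (h : p a = false) :
    List.findIdx? p (l ++ [a]) = List.findIdx? p l := by
  rw [List.findIdx?_append]
  simp [List.findIdx?_cons, h]

-- A's scan characterized by findIdx?
lemma pvScan_eq (target κ : String) : ∀ (rest : List String) (lines : List String) (i : Nat),
    pvSetOrAddGo lines target κ rest i =
      match List.findIdx? (pvMatchA κ) rest with
      | none => (lines ++ [target], true)
      | some j => if rest[j]? = some target then (lines, false)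
                  else (lines.set (i + j) target, true)
  | [], lines, i => by simp [pvSetOrAddGo]
  | l :: rest, lines, i => by
    simp only [pvSetOrAddGo, List.findIdx?_cons]
    by_cases hm : pvMatchA κ l = true
    · simp only [hm, if_true]
      by_cases he : l = target
      · simp [he]
      · simp [he]
    · simp only [Bool.not_eq_true] at hm
      rw [pvScan_eq target κ rest lines (i + 1)]
      simp only [hm, Bool.false_eq_true, if_false]
      cases hf : List.findIdx? (pvMatchA κ) rest with
      | none => simp
      | some j =>
        have harith : i + (j + 1) = i + 1 + j := by omega
        simp [List.getElem?_cons_succ, harith]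

-- B's one-pass dict characterized by findIdx? over pvTok?
set_option maxHeartbeats 1000000 in
lemma pvBuild_go (κ : String) : ∀ (ls : List String) (st : Int) (d : PySem.Dict String Int),
    ((PySem.List.enumerate ls st).foldl pvIdxStep d).get? κ =
      if d.contains κ then d.get? κ
      else (List.findIdx? (fun l => pvTok? l == some κ) ls).map (fun (n : Nat) => st + (n : Int))
  | [], st, d => by
    cases hc : d.contains κ with
    | false =>
      simp only [PySem.List.enumerate, List.foldl_nil, List.findIdx?_nil, Option.map_none,
        Bool.false_eq_true, if_false]
      exact (PySem.Dict.get?_eq_none_iff_contains _ _).mpr hc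
    | true => simp [PySem.List.enumerate]
  | l :: ls, st, d => by
    rw [show PySem.List.enumerate (l :: ls) st = (st, l) :: PySem.List.enumerate ls (st + 1) from rfl,
      List.foldl_cons]
    have hstep : pvIdxStep d (st, l) = (match pvTok? l with
        | none => d
        | some tok => if d.contains tok then d else d.insert tok st) := by
      simp only [pvIdxStep, pvTok?]
      by_cases h1 : PySem.Str.isIn "=" (PySem.Str.strip l) = true
      · rw [if_pos h1, if_pos h1]
        by_cases h2 : PySem.Str.isIn " " (PySem.Str.lower (PySem.Str.strip l)) = true
        · rw [if_pos h2, if_pos h2]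
          try rfl
        · rw [if_neg h2, if_neg h2]
          try rfl
      · rw [if_neg h1, if_neg h1]
        try rfl
    rw [hstep]
    cases hpt : pvTok? l with
    | none =>
      rw [pvBuild_go κ ls (st + 1) d, List.findIdx?_cons]
      simp only [hpt]
      rw [show ((none : Option String) == some κ) = false from rfl]
      simp only [Bool.false_eq_true, if_false]
      by_cases hcc : d.contains κ = true
      · rw [if_pos hcc, if_pos hcc]
      · rw [if_neg hcc, if_neg hcc]
        cases List.findIdx? (fun l => pvTok? l == some κ) ls
        · simp
        · simp only [Option.map_some]
          congr 1
          push_cast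
          ring
    | some t =>
      by_cases htκ : t = κ
      · subst htκ
        rw [List.findIdx?_cons]
        simp only [hpt, beq_self_eq_true, if_true]
        by_cases hc : d.contains t = true
        · rw [if_pos hc, pvBuild_go t ls (st + 1) d, if_pos hc, if_pos hc]
        · rw [if_neg hc, pvBuild_go t ls (st + 1) (d.insert t st),
            if_pos (PySem.Dict.contains_insert_self _ _ _), PySem.Dict.get?_insert_self,
            if_neg hc]
          simp
      · have hne : κ ≠ t := fun h => htκ h.symm
        have hbeq : ((some t == some κ) : Bool) = false :=
          beq_eq_false_iff_ne.mpr (fun h => htκ (Option.some.inj h))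
        rw [List.findIdx?_cons]
        simp only [hpt, hbeq, Bool.false_eq_true, if_false]
        have hrest : ∀ d' : PySem.Dict String Int, d'.contains κ = d.contains κ →
            d'.get? κ = d.get? κ →
            ((PySem.List.enumerate ls (st + 1)).foldl pvIdxStep d').get? κ =
              if d.contains κ then d.get? κ
              else (Option.map (fun i => i + 1)
                  (List.findIdx? (fun l => pvTok? l == some κ) ls)).map (fun (n : Nat) => st + (n : Int)) := by
          intro d' hcon hget
          rw [pvBuild_go κ ls (st + 1) d', hcon, hget]
          by_cases hcc : d.contains κ = true
          · rw [if_pos hcc, if_pos hcc]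
          · rw [if_neg hcc, if_neg hcc]
            cases List.findIdx? (fun l => pvTok? l == some κ) ls
            · simp
            · simp only [Option.map_some]
              congr 1
              push_cast
              ring
        cases hc : d.contains t with
        | true => exact hrest d rfl rfl
        | false =>
          exact hrest (d.insert t st)
            (by rw [PySem.Dict.contains_insert]; simp [hne])
            (PySem.Dict.get?_insert_of_ne d st hne)

-- the sequencing invariant: processing distinct keys left to right, A's rescans of the evolving
-- list and B's lookups in the dict built from the original list stay in step
set_option maxHeartbeats 1000000 in
lemma pvMain : ∀ (pairs : List (String × String)) (lines0 cur : List String) (ch : Bool)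
    (d : PySem.Dict String Int),
    (∀ p ∈ pairs, ' ' ∉ (PySem.Str.lower p.1).toList) →
    (∀ p ∈ pairs, pvTok? (pvTgt p) = some (PySem.Str.lower p.1)) →
    (pairs.map (fun p => PySem.Str.lower p.1)).Nodup →
    (∀ p ∈ pairs, d.get? (PySem.Str.lower p.1)
        = (List.findIdx? (pvMatchA (PySem.Str.lower p.1)) lines0).map (fun (n : Nat) => (n : Int))) →
    (∀ p ∈ pairs, List.findIdx? (pvMatchA (PySem.Str.lower p.1)) cur
        = List.findIdx? (pvMatchA (PySem.Str.lower p.1)) lines0) →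
    (∀ p ∈ pairs, ∀ j, List.findIdx? (pvMatchA (PySem.Str.lower p.1)) lines0 = some j →
        cur[j]? = lines0[j]?) →
    pairs.foldl pvStepA (cur, ch) = pairs.foldl (pvStepB d) (cur, ch)
  | [], _, _, _, _, _, _, _, _, _, _ => rfl
  | p :: ps, lines0, cur, ch, d, H1, H2, Hnd, Hd, HRf, HRg => by
    have hκ : ' ' ∉ (PySem.Str.lower p.1).toList := H1 p (List.mem_cons_self)
    have hκq : ∀ q ∈ ps, (PySem.Str.lower q.1) ≠ (PySem.Str.lower p.1) := by
      intro q hq heq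
      exact (List.nodup_cons.mp Hnd).1 (List.mem_map.mpr ⟨q, hq, heq⟩)
    -- matching of the written target line against later keys is always false
    have hmT : ∀ q ∈ ps, pvMatchA (PySem.Str.lower q.1) (pvTgt p) = false := by
      intro q hq
      rw [pvMatch_eq_tok _ _ (H1 q (List.mem_cons_of_mem p hq)), H2 p List.mem_cons_self]
      exact beq_eq_false_iff_ne.mpr (fun h => hκq q hq (Option.some.inj h).symm)
    rw [List.foldl_cons, List.foldl_cons]
    cases hf : List.findIdx? (pvMatchA (PySem.Str.lower p.1)) lines0 with
    | none =>
      have hfc : List.findIdx? (pvMatchA (PySem.Str.lower p.1)) cur = none := by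
        rw [HRf p List.mem_cons_self, hf]
      have hA : pvStepA (cur, ch) p = (cur ++ [pvTgt p], true) := by
        show (let r := pvSetOrAddGo cur (pvTgt p) (PySem.Str.lower p.1) cur 0;
          (r.1, ch || r.2)) = _
        rw [pvScan_eq, hfc]
        simp
      have hB : pvStepB d (cur, ch) p = (cur ++ [pvTgt p], true) := by
        show (match d.get? (PySem.Str.lower p.1) with
              | none => (cur ++ [pvTgt p], true)
              | some i => if PySem.List.pyGetD cur i "" ≠ pvTgt p
                          then (PySem.List.pySetD cur i (pvTgt p), true) else (cur, ch)) = _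
        rw [Hd p List.mem_cons_self, hf]
        rfl
      rw [hA, hB]
      apply pvMain ps lines0 (cur ++ [pvTgt p]) true d
      · exact fun q hq => H1 q (List.mem_cons_of_mem p hq)
      · exact fun q hq => H2 q (List.mem_cons_of_mem p hq)
      · exact (List.nodup_cons.mp Hnd).2
      · exact fun q hq => Hd q (List.mem_cons_of_mem p hq)
      · intro q hq
        rw [pvFindIdx?_append_singleton _ _ _ (hmT q hq)]
        exact HRf q (List.mem_cons_of_mem p hq)
      · intro q hq j hj
        have hold := HRg q (List.mem_cons_of_mem p hq) j hj
        obtain ⟨hjlt, -, -⟩ := List.findIdx?_eq_some_iff_getElem.mp hj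
        have hjc : j < cur.length := by
          have : cur[j]? = some lines0[j] := by rw [hold, List.getElem?_eq_getElem hjlt]
          exact (List.getElem?_eq_some_iff.mp this).1
        rw [List.getElem?_append_left hjc]
        exact hold
    | some j =>
      have hfc : List.findIdx? (pvMatchA (PySem.Str.lower p.1)) cur = some j := by
        rw [HRf p List.mem_cons_self, hf]
      obtain ⟨hjc, hmc, -⟩ := List.findIdx?_eq_some_iff_getElem.mp hfc
      have hget : PySem.List.pyGetD cur ((j : Nat) : Int) "" = cur[j] := by
        rw [PySem.List.pyGetD_natCast, List.getD_eq_getElem cur "" hjc]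
      have hA : pvStepA (cur, ch) p
          = (if cur[j]? = some (pvTgt p) then (cur, ch) else (cur.set j (pvTgt p), true)) := by
        show (let r := pvSetOrAddGo cur (pvTgt p) (PySem.Str.lower p.1) cur 0;
          (r.1, ch || r.2)) = _
        rw [pvScan_eq, hfc]
        by_cases he : cur[j]? = some (pvTgt p)
        · simp [he]
        · simp [he]
      have hB : pvStepB d (cur, ch) p
          = (if cur[j]? = some (pvTgt p) then (cur, ch) else (cur.set j (pvTgt p), true)) := by
        show (match d.get? (PySem.Str.lower p.1) with
              | none => (cur ++ [pvTgt p], true)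
              | some i => if PySem.List.pyGetD cur i "" ≠ pvTgt p
                          then (PySem.List.pySetD cur i (pvTgt p), true) else (cur, ch)) = _
        rw [Hd p List.mem_cons_self, hf]
        show (if PySem.List.pyGetD cur ((j : Nat) : Int) "" ≠ pvTgt p
              then (PySem.List.pySetD cur ((j : Nat) : Int) (pvTgt p), true) else (cur, ch)) = _
        rw [hget]
        by_cases he : cur[j] = pvTgt p
        · rw [if_neg (by simp [he]), if_pos (by rw [List.getElem?_eq_getElem hjc, he])]
        · rw [if_pos (by simp [he]),
            if_neg (by rw [List.getElem?_eq_getElem hjc]; simp [he]),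
            show PySem.List.pySetD cur ((j : Nat) : Int) (pvTgt p) = cur.set j (pvTgt p) from by
              simp [pysem]]
      rw [hA, hB]
      -- later keys never match the line at j (it carries key p's token), before or after writing
      have hmj : ∀ q ∈ ps, pvMatchA (PySem.Str.lower q.1) cur[j] = false := by
        intro q hq
        have htokj : pvTok? cur[j] = some (PySem.Str.lower p.1) := by
          have := (pvMatch_eq_tok (PySem.Str.lower p.1) cur[j] hκ) ▸ hmc
          exact eq_of_beq this
        rw [pvMatch_eq_tok _ _ (H1 q (List.mem_cons_of_mem p hq)), htokj]
        exact beq_eq_false_iff_ne.mpr (fun h => hκq q hq (Option.some.inj h).symm)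
      by_cases he : cur[j]? = some (pvTgt p)
      · rw [if_pos he]
        apply pvMain ps lines0 cur ch d
        · exact fun q hq => H1 q (List.mem_cons_of_mem p hq)
        · exact fun q hq => H2 q (List.mem_cons_of_mem p hq)
        · exact (List.nodup_cons.mp Hnd).2
        · exact fun q hq => Hd q (List.mem_cons_of_mem p hq)
        · exact fun q hq => HRf q (List.mem_cons_of_mem p hq)
        · exact fun q hq => HRg q (List.mem_cons_of_mem p hq)
      · rw [if_neg he]
        apply pvMain ps lines0 (cur.set j (pvTgt p)) true d
        · exact fun q hq => H1 q (List.mem_cons_of_mem p hq)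
        · exact fun q hq => H2 q (List.mem_cons_of_mem p hq)
        · exact (List.nodup_cons.mp Hnd).2
        · exact fun q hq => Hd q (List.mem_cons_of_mem p hq)
        · intro q hq
          rw [pvFindIdx?_set _ _ _ _ (hmT q hq)
            (fun x hx => by
              rw [List.getElem?_eq_getElem hjc] at hx
              exact Option.some.inj hx ▸ hmj q hq)]
          exact HRf q (List.mem_cons_of_mem p hq)
        · intro q hq j' hj'
          have hold := HRg q (List.mem_cons_of_mem p hq) j' hj'
          obtain ⟨hj'lt, hmq', -⟩ := List.findIdx?_eq_some_iff_getElem.mp hj'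
          have hne : j ≠ j' := by
            intro heq
            subst heq
            have : cur[j]? = some lines0[j] := by rw [hold, List.getElem?_eq_getElem hj'lt]
            have hcj : cur[j] = lines0[j] := by
              rw [List.getElem?_eq_getElem hjc] at this
              exact Option.some.inj this
            rw [← hcj] at hmq'
            rw [hmj q hq] at hmq'
            exact absurd hmq' (by simp)
          rw [List.getElem?_set_ne hne]
          exact hold

-- the nested concrete loops of the ports, flattened to one fold over the 12 pairs
lemma pvA_flat (lines : List String) :
    detach_iso_devices lines = pvPairs12.foldl pvStepA (lines, false) := by
  have hstep : (fun (st : List String × Bool) (kv : String × String) =>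
      let r := pvSetOrAddVmx st.1 kv.1 kv.2; (r.1, st.2 || r.2)) = pvStepA := rfl
  simp only [detach_iso_devices, pvCdromAddrs, pvPairs12, hstep, List.foldl_cons,
    List.foldl_nil, List.foldl_append]

lemma pvB_flat (lines : List String) :
    detach_iso_devices_alt lines = pvPairs12.foldl (pvStepB (pvBuildIdx lines)) (lines, false) := by
  simp only [detach_iso_devices_alt, pvCdromAddrs, pvPairs12, List.foldl_cons,
    List.foldl_nil, List.foldl_append]

-- ===== VERDICT (by name: the statement is the Claim_ definition above) =====
set_option maxHeartbeats 1000000 in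
theorem detach_iso_devices_spec : Claim_equal_detach_iso_devices := by
  unfold Claim_equal_detach_iso_devices Spec_detach_iso_devices
  intro lines _
  rw [pvA_flat, pvB_flat]
  have H1 : ∀ p ∈ pvPairs12, ' ' ∉ (PySem.Str.lower p.1).toList := by decide
  have H2 : ∀ p ∈ pvPairs12, pvTok? (pvTgt p) = some (PySem.Str.lower p.1) := by decide
  have Hnd : (pvPairs12.map (fun p => PySem.Str.lower p.1)).Nodup := by decide
  apply pvMain pvPairs12 lines lines false (pvBuildIdx lines) H1 H2 Hnd
  · intro p hp
    rw [pvBuildIdx, pvBuild_go, if_neg (by rw [PySem.Dict.contains_empty]; simp)]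
    rw [show (fun l => pvTok? l == some (PySem.Str.lower p.1)) = pvMatchA (PySem.Str.lower p.1)
      from funext fun l => (pvMatch_eq_tok _ l (H1 p hp)).symm]
    cases hx : List.findIdx? (pvMatchA (PySem.Str.lower p.1)) lines
    · simp
    · simp
  · intro p _
    rfl
  · intro p _ j h
    rfl
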